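-- pv_equiv track=rewrite | github.com/honu-shell-utions/python | sandbox/project_euler/601-650/612_friend_numbers02.py | F0
-- ===== SOURCE A (Python) =====
-- from math import factorial
--
-- def F(a, b):
--     assert a >= 0 and b >= 0
--     if a < b or a == 0:
--         return 0
--     if b == 0:
--         return 10 ** a
--     if a == b:
--         return factorial(a)
--     return (10 - b) * F(a - 1, b) + b * F(a - 1, b - 1)
--
-- def F0(a, b):
--     assert a >= 0 and b >= 0
--     if a < b or a == 0:
--         return 0
--     if b == 0:
--         return 10 ** a
--     if a == b:
--         return factorial(a) - factorial(a - 1)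
--     return (10 - b) * F(a - 1, b) + (b - 1) * F(a - 1, b - 1) + F0(a - 1, b)
-- ===== SOURCE B (Python) =====
-- from math import factorial
--
-- def F0(a, b):
--     assert a >= 0 and b >= 0
--     if a < b or a == 0:
--         return 0
--     if b == 0:
--         return 10 ** a
--     if a == b:
--         return factorial(a) - factorial(a - 1)
--     # bottom-up tabulation: row[j] = F(i, j) for j = 0..b, f0 = F0(i, b)
--     row = [10, 1] + [0] * (b - 1)   # i = 1
--     f0 = 0
--     for i in range(2, a + 1):
--         f0 = (10 - b) * row[b] + (b - 1) * row[b - 1] + f0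
--         row = [10 * row[0]] + [(10 - j) * row[j] + j * row[j - 1]
--                                for j in range(1, b + 1)]
--     return f0
-- ===== Notes on version B (the rewrite author's own statement) =====
-- stated objective: alternative
-- what changed: Replaced A's exponential top-down double recursion on F/F0 by a bottom-up tabulation that sweeps one row of F-values plus an F0 accumulator from i=1 up to a.
import Mathlib
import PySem

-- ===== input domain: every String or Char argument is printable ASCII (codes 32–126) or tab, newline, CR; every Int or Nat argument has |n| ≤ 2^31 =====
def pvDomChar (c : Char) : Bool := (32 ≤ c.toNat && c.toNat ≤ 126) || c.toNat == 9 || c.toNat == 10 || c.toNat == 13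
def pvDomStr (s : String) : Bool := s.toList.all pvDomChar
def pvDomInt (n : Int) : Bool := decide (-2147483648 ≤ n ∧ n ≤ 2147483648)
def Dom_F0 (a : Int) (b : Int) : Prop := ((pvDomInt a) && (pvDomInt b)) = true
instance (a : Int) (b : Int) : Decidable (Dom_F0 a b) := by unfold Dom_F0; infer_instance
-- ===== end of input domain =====

-- B replaces A's top-down double recursion on F/F0 by a bottom-up row tabulation over (i, j); objective: alternative.

-- ===== PORT A =====
def F (a : Int) (b : Int) : Int :=
  if a < 0 ∨ b < 0 then 0  -- Python: assert raises here; outside Pre_F0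
  else if a < b ∨ a = 0 then 0
  else if b = 0 then 10 ^ a.toNat
  else if a = b then (a.toNat.factorial : Int)
  else (10 - b) * F (a - 1) b + b * F (a - 1) (b - 1)
termination_by a.toNat
decreasing_by all_goals omega

def F0 (a : Int) (b : Int) : Int :=
  if a < 0 ∨ b < 0 then 0  -- Python: assert raises here; outside Pre_F0
  else if a < b ∨ a = 0 then 0
  else if b = 0 then 10 ^ a.toNat
  else if a = b then (a.toNat.factorial : Int) - ((a - 1).toNat.factorial : Int)
  else (10 - b) * F (a - 1) b + (b - 1) * F (a - 1) (b - 1) + F0 (a - 1) b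
termination_by a.toNat
decreasing_by omega

-- ===== PORT B =====
-- one loop iteration of Source B: state = (row, f0); f0 is updated from the old row, then the row is rebuilt
def pvStep (b : Int) (st : List Int × Int) : List Int × Int :=
  let f0' := (10 - b) * PySem.List.pyGetD st.1 b 0 + (b - 1) * PySem.List.pyGetD st.1 (b - 1) 0 + st.2
  let row' := 10 * PySem.List.pyGetD st.1 0 0 ::
      (PySem.List.pyRange 1 (b + 1) 1).map
        (fun j => (10 - j) * PySem.List.pyGetD st.1 j 0 + j * PySem.List.pyGetD st.1 (j - 1) 0)
  (row', f0')

def F0_alt (a : Int) (b : Int) : Int :=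
  if a < 0 ∨ b < 0 then 0  -- Python: assert raises here; outside Pre_F0
  else if a < b ∨ a = 0 then 0
  else if b = 0 then 10 ^ a.toNat
  else if a = b then (a.toNat.factorial : Int) - ((a - 1).toNat.factorial : Int)
  else ((PySem.List.pyRange 2 (a + 1) 1).foldl (fun st _ => pvStep b st)
        ((10 : Int) :: (1 : Int) :: List.replicate (b - 1).toNat 0, 0)).2

-- ===== PRECONDITION & SPEC =====
-- Pre_F0 excludes exactly the inputs on which A's assert raises AssertionError (a < 0 or b < 0)
def Pre_F0 (a : Int) (b : Int) : Prop := 0 ≤ a ∧ 0 ≤ b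
instance (a : Int) (b : Int) : Decidable (Pre_F0 a b) := by unfold Pre_F0; infer_instance
def pvWitness_F0 : Int × Int := (3, 2)

def Spec_F0 (a : Int) (b : Int) (out : Int) : Prop := out = F0_alt a b
instance (a : Int) (b : Int) (out : Int) : Decidable (Spec_F0 a b out) := by unfold Spec_F0; infer_instance

-- ===== CLAIM (what is proved, stated in full; the proofs are below) =====
def Claim_equal_F0 : Prop := ∀ (a : Int) (b : Int), Dom_F0 a b → Pre_F0 a b → Spec_F0 a b (F0 a b)

-- ===== LEMMAS AND PROOFS =====

-- row of F-values kept by B's loop: rowSpec b i = [F i 0, F i 1, …, F i b]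
def rowSpec (b i : Int) : List Int := (PySem.List.pyRange 0 (b + 1) 1).map (fun j => F i j)

theorem F_lt (a b : Int) (ha : 0 ≤ a) (hb : 0 ≤ b) (h : a < b) : F a b = 0 := by
  rw [F]; simp only [if_neg (by omega : ¬(a < 0 ∨ b < 0)), if_pos (Or.inl h)]

theorem F_diag (i : Int) (h : 1 ≤ i) : F i i = (i.toNat.factorial : Int) := by
  rw [F]
  simp only [if_neg (by omega : ¬(i < 0 ∨ i < 0)), if_neg (by omega : ¬(i < i ∨ i = 0)),
    if_neg (by omega : ¬(i = 0)), if_true]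

theorem F_zero_col (i : Int) (h : 1 ≤ i) : F i 0 = 10 ^ i.toNat := by
  rw [F]
  simp only [if_neg (by omega : ¬(i < 0 ∨ (0:Int) < 0)), if_neg (by omega : ¬(i < 0 ∨ i = 0)),
    if_true]

theorem fact_succ_int (i : Int) (h : 1 ≤ i) :
    (i.toNat.factorial : Int) = i * ((i - 1).toNat.factorial : Int) := by
  have hm : i.toNat = (i - 1).toNat + 1 := by omega
  have hc : ((i - 1).toNat : Int) = i - 1 := by omega
  rw [hm, Nat.factorial_succ]
  push_cast
  rw [hc]; ring

theorem F_rec (i j : Int) (hi : 2 ≤ i) (hj : 1 ≤ j) :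
    F i j = (10 - j) * F (i - 1) j + j * F (i - 1) (j - 1) := by
  rcases lt_trichotomy i j with h | h | h
  · rw [F_lt i j (by omega) (by omega) h, F_lt (i-1) j (by omega) (by omega) (by omega),
      F_lt (i-1) (j-1) (by omega) (by omega) (by omega)]
    ring
  · subst h
    rw [F_diag i (by omega), F_lt (i-1) i (by omega) (by omega) (by omega),
      show i - 1 = i - 1 from rfl, F_diag (i-1) (by omega), fact_succ_int i (by omega)]
    ring
  · rw [F]
    simp only [if_neg (by omega : ¬(i < 0 ∨ j < 0)), if_neg (by omega : ¬(i < j ∨ i = 0)),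
      if_neg (by omega : ¬(j = 0)), if_neg (by omega : ¬(i = j))]

theorem F0_lt (a b : Int) (ha : 0 ≤ a) (hb : 0 ≤ b) (h : a < b) : F0 a b = 0 := by
  rw [F0]; simp only [if_neg (by omega : ¬(a < 0 ∨ b < 0)), if_pos (Or.inl h)]

theorem F0_one (b : Int) (hb : 1 ≤ b) : F0 1 b = 0 := by
  rcases eq_or_lt_of_le hb with h | h
  · rw [F0]
    simp only [if_neg (by omega : ¬((1:Int) < 0 ∨ b < 0)),
      if_neg (by omega : ¬((1:Int) < b ∨ (1:Int) = 0)), if_neg (by omega : ¬(b = 0)),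
      if_pos (by omega : (1:Int) = b)]
    norm_num [Nat.factorial]
  · exact F0_lt 1 b (by omega) (by omega) h

theorem F0_rec (i b : Int) (hi : 2 ≤ i) (hb : 1 ≤ b) :
    F0 i b = (10 - b) * F (i - 1) b + (b - 1) * F (i - 1) (b - 1) + F0 (i - 1) b := by
  rcases lt_trichotomy i b with h | h | h
  · rw [F0_lt i b (by omega) (by omega) h, F_lt (i-1) b (by omega) (by omega) (by omega),
      F_lt (i-1) (b-1) (by omega) (by omega) (by omega),
      F0_lt (i-1) b (by omega) (by omega) (by omega)]
    ring
  · subst h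
    rw [F0]
    simp only [if_neg (by omega : ¬(i < 0 ∨ i < 0)), if_neg (by omega : ¬(i < i ∨ i = 0)),
      if_neg (by omega : ¬(i = 0)), if_true]
    rw [F_lt (i-1) i (by omega) (by omega) (by omega), F_diag (i-1) (by omega),
      F0_lt (i-1) i (by omega) (by omega) (by omega), fact_succ_int i (by omega)]
    ring
  · rw [F0]
    simp only [if_neg (by omega : ¬(i < 0 ∨ b < 0)), if_neg (by omega : ¬(i < b ∨ i = 0)),
      if_neg (by omega : ¬(b = 0)), if_neg (by omega : ¬(i = b))]

theorem rowSpec_get (b i j : Int) (h0 : 0 ≤ j) (h1 : j < b + 1) :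
    PySem.List.pyGetD (rowSpec b i) j 0 = F i j := by
  unfold rowSpec
  exact PySem.List.pyGetD_map_pyRange_of_nonneg _ _ _ _ h0 h1

theorem step_spec (b i : Int) (hb : 1 ≤ b) (hi : 1 ≤ i) :
    pvStep b (rowSpec b i, F0 i b) = (rowSpec b (i + 1), F0 (i + 1) b) := by
  unfold pvStep
  refine Prod.ext ?_ ?_
  · show (10 * PySem.List.pyGetD (rowSpec b i) 0 0 :: _) = rowSpec b (i + 1)
    conv_rhs => rw [rowSpec, PySem.List.pyRange_one_cons (by omega : (0:Int) < b + 1)]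
    rw [List.map_cons]
    congr 1
    · rw [rowSpec_get b i 0 (by omega) (by omega), F_zero_col i hi, F_zero_col (i+1) (by omega)]
      have : (i + 1).toNat = i.toNat + 1 := by omega
      rw [this, pow_succ]; ring
    · exact (List.map_congr_left (fun j hj => by
        have hjm := (PySem.List.mem_pyRange_one).1 hj
        rw [rowSpec_get b i j (by omega) (by omega),
          rowSpec_get b i (j-1) (by omega) (by omega),
          F_rec (i+1) j (by omega) (by omega)]
        simp)).symm
  · show (10 - b) * PySem.List.pyGetD (rowSpec b i) b 0 +
        (b - 1) * PySem.List.pyGetD (rowSpec b i) (b - 1) 0 + F0 i b = F0 (i + 1) b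
    rw [rowSpec_get b i b (by omega) (by omega), rowSpec_get b i (b-1) (by omega) (by omega),
      F0_rec (i+1) b (by omega) hb]
    simp

theorem rowSpec_one (b : Int) (hb : 1 ≤ b) :
    rowSpec b 1 = (10 : Int) :: (1 : Int) :: List.replicate (b - 1).toNat 0 := by
  unfold rowSpec
  rw [PySem.List.pyRange_one_cons (by omega : (0:Int) < b + 1),
    show (0:Int) + 1 = 1 from by norm_num,
    PySem.List.pyRange_one_cons (by omega : (1:Int) < b + 1)]
  rw [List.map_cons, List.map_cons]
  congr 1
  · rw [F_zero_col 1 (by omega)]; norm_num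
  congr 1
  · rw [F_diag 1 (by omega)]; norm_num [Nat.factorial]
  · rw [List.eq_replicate_iff]
    refine ⟨by rw [List.length_map, PySem.List.length_pyRange_one]; omega, ?_⟩
    intro x hx
    rcases List.mem_map.1 hx with ⟨j, hj, rfl⟩
    have hjm := (PySem.List.mem_pyRange_one).1 hj
    exact F_lt 1 j (by omega) (by omega) (by omega)

theorem loop_inv (b : Int) (hb : 1 ≤ b) (n : Nat) :
    (PySem.List.pyRange 2 (2 + (n : Int)) 1).foldl (fun st _ => pvStep b st) (rowSpec b 1, 0)
      = (rowSpec b (1 + (n : Int)), F0 (1 + (n : Int)) b) := by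
  induction n with
  | zero =>
    simp only [Nat.cast_zero, add_zero]
    rw [PySem.List.pyRange_one_eq_nil (le_refl 2)]
    simp [F0_one b hb]
  | succ n ih =>
    have h1 : (2 : Int) + ((n+1 : Nat) : Int) = (2 + (n:Int)) + 1 := by push_cast; ring
    rw [h1, PySem.List.pyRange_one_succ_right (by omega), List.foldl_append, ih,
      show (1:Int) + ((n + 1 : Nat) : Int) = (1 + (n:Int)) + 1 from by push_cast; ring]
    simp only [List.foldl_cons, List.foldl_nil]
    exact step_spec b (1 + (n:Int)) hb (by omega)

-- ===== VERDICT (by name: the statement is the Claim_ definition above) =====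
theorem F0_spec : Claim_equal_F0 := by
  intro a b _ hpre
  obtain ⟨ha, hb⟩ := hpre
  unfold Spec_F0 F0_alt
  by_cases h1 : a < b ∨ a = 0
  · rw [F0]
    simp only [if_neg (by omega : ¬(a < 0 ∨ b < 0)), if_pos h1]
  · by_cases h2 : b = 0
    · rw [F0]
      simp only [if_neg (by omega : ¬(a < 0 ∨ b < 0)), if_neg h1, if_pos h2]
    · by_cases h3 : a = b
      · rw [F0]
        simp only [if_neg (by omega : ¬(a < 0 ∨ b < 0)), if_neg h1, if_neg h2, if_pos h3]
      simp only [if_neg (by omega : ¬(a < 0 ∨ b < 0)), if_neg h1, if_neg h2, if_neg h3]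
      have hb1 : 1 ≤ b := by omega
      obtain ⟨n, rfl⟩ : ∃ n : Nat, a = 1 + (n : Int) := ⟨(a - 1).toNat, by omega⟩
      rw [show (1 + (n:Int)) + 1 = 2 + (n:Int) by ring, ← rowSpec_one b hb1, loop_inv b hb1 n]
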